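-- pv_equiv track=rewrite | github.com/miliar/Code_Jam_Webscraper | solutions_python/solutions_year16_round2_nr1/724.py | pullOut
-- ===== SOURCE A (Python) =====
-- def pullOut (letter, digit, digitWord, scramble):
--     newScramble = scramble
--     currentNumbers = []
--     while (newScramble.find(letter) != -1):
--         for char in digitWord:
--             newScramble = newScramble.replace(char, "", 1)
--         currentNumbers.append(digit)
--     return newScramble, currentNumbers
-- ===== SOURCE B (Python) =====
-- def pullOut(letter, digit, digitWord, scramble):
--     k = scramble.count(letter)
--     if k == 0:
--         return scramble, []
--     t = digitWord.count(letter)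
--     reps = (k + t - 1) // t
--     budget = {}
--     for c in digitWord:
--         budget[c] = budget.get(c, 0) + reps
--     kept = []
--     for ch in scramble:
--         if budget.get(ch, 0) > 0:
--             budget[ch] = budget[ch] - 1
--         else:
--             kept.append(ch)
--     return "".join(kept), [digit] * reps
-- ===== Notes on version B (the rewrite author's own statement) =====
-- stated objective: alternative
-- what changed: Replaces A's while-loop of repeated one-at-a-time str.replace scans (one pass over scramble per digitWord character per loop iteration) with a single counting pass: the iteration count is computed up front as reps = ceil(scramble.count(letter) / digitWord.count(letter)), a per-character deletion budget reps*digitWord.count(c) is built once in a dict, and one left-to-right sweep of scramble drops a character while its budget is positive.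
-- outside the precondition, e.g. on pullOut('ab', '7', 'aab', 'abab'): A returns ('b', ['7']), B returns ('', ['7', '7']); on pullOut('ab', '7', 'b', 'ab'): A returns ('a', ['7']), B raises ZeroDivisionError; on pullOut('ab', '7', 'ab', 'cab'): A returns ('c', ['7']), B returns ('c', ['7'])
import Mathlib
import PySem

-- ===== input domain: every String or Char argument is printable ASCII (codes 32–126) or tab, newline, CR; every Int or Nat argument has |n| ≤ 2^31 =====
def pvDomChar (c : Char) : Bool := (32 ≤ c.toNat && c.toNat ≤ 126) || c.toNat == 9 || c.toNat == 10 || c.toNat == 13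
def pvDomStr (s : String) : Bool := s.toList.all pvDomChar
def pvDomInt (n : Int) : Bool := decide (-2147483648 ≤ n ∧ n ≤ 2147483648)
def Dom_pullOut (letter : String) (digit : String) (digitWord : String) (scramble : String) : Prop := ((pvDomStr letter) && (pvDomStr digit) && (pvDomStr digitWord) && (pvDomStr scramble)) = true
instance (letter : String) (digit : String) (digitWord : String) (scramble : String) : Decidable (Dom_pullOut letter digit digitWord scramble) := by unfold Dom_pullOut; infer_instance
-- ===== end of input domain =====

-- B replaces A's repeated replace-scan loop by one counting pass: k = scramble.count(letter),
-- a per-character deletion budget k·digitWord.count(c), and a single left-to-right sweep.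

-- ===== PORT A =====

/-- `s.replace(char, "", 1)` for a one-character `char`: drop the first occurrence.
    Hand port (exact for a 1-char pattern and empty replacement, which is the only way A calls it:
    PySem.Chars.replace has no count argument). -/
def pvRemoveFirst (c : Char) : List Char → List Char
  | [] => []
  | x :: xs => if x = c then xs else x :: pvRemoveFirst c xs

/-- A's while-loop. The fuel is a totality guard only: `pullOut` passes `scramble.length + 1`,
    which Pre_pullOut guarantees is more than the number of iterations of the Python loop. -/
def pullOutLoop (letter : List Char) (digit : String) (digitWord : List Char) :
    Nat → List Char → List String → List Char × List String
  | 0, s, nums => (s, nums)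
  | fuel + 1, s, nums =>
    if PySem.Chars.find s letter ≠ -1 then
      pullOutLoop letter digit digitWord fuel
        (digitWord.foldl (fun t c => pvRemoveFirst c t) s) (nums ++ [digit])
    else (s, nums)

def pullOut (letter : String) (digit : String) (digitWord : String) (scramble : String) :
    String × List String :=
  let r := pullOutLoop letter.toList digit digitWord.toList
      (scramble.toList.length + 1) scramble.toList []
  (String.ofList r.1, r.2)

-- ===== PORT B =====

def pullOut_alt (letter : String) (digit : String) (digitWord : String) (scramble : String) :
    String × List String :=
  let k : Nat := PySem.Str.count scramble letter
  if k = 0 then (scramble, [])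
  else
    -- Python's `(k + t - 1) // t` on nonnegative ints is Nat division (t = 0 here would be
    -- Python's ZeroDivisionError, outside Pre_)
    let t : Nat := PySem.Str.count digitWord letter
    let reps : Nat := (k + t - 1) / t
    let budget : PySem.Dict Char Int :=
      digitWord.toList.foldl (fun d c => d.insert c (d.getD c 0 + (reps : Int))) PySem.Dict.empty
    -- `budget[ch] -= 1` runs only under `budget.get(ch, 0) > 0`, so the key exists: insert overwrites it
    let r := scramble.toList.foldl
      (fun (st : PySem.Dict Char Int × List Char) ch =>
        if st.1.getD ch 0 > 0 then (st.1.insert ch (st.1.getD ch 0 - 1), st.2)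
        else (st.1, st.2 ++ [ch]))
      (budget, [])
    (String.ofList r.2, List.replicate reps digit)

-- ===== PRECONDITION & SPEC =====

-- Pre_ excludes (a) inputs on which A never terminates and so returns nothing (letter occurs in
-- scramble but no pass removes an occurrence of it), and (b) multi-character letters occurring in
-- scramble: there per-pass single-character removals interact with substring matching in a way the
-- task never specifies, neither program's value is the intended one, and B's natural count/ceil
-- computation may divide by zero.
def Pre_pullOut (letter : String) (digit : String) (digitWord : String) (scramble : String) : Prop :=
  PySem.Str.find scramble letter = -1 ∨
  (letter.toList.length = 1 ∧ 1 ≤ PySem.Str.count digitWord letter)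
instance (letter : String) (digit : String) (digitWord : String) (scramble : String) : Decidable (Pre_pullOut letter digit digitWord scramble) := by unfold Pre_pullOut; infer_instance

def pvWitness_pullOut : String × String × String × String := ("a", "7", "xay", "bxaxyay")

def Spec_pullOut (letter : String) (digit : String) (digitWord : String) (scramble : String) (out : String × List String) : Prop := out = pullOut_alt letter digit digitWord scramble
instance (letter : String) (digit : String) (digitWord : String) (scramble : String) (out : String × List String) : Decidable (Spec_pullOut letter digit digitWord scramble out) := by unfold Spec_pullOut; infer_instance

-- ===== CLAIM (what is proved, stated in full; the proofs are below) =====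
def Claim_equal_pullOut : Prop := ∀ (letter : String) (digit : String) (digitWord : String) (scramble : String), Dom_pullOut letter digit digitWord scramble → Pre_pullOut letter digit digitWord scramble → Spec_pullOut letter digit digitWord scramble (pullOut letter digit digitWord scramble)

-- ===== LEMMAS AND PROOFS =====

/-- Remove, for each character, its first `bag.count c` occurrences (a multiset of pending deletions). -/
def pvDropBag : List Char → List Char → List Char
  | _, [] => []
  | bag, x :: xs => if x ∈ bag then pvDropBag (bag.erase x) xs else x :: pvDropBag bag xs

theorem pvDropBag_nil (s : List Char) : pvDropBag [] s = s := by
  induction s with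
  | nil => rfl
  | cons x xs ih => simp [pvDropBag, ih]

theorem pvRemoveFirst_eq (c : Char) (s : List Char) : pvRemoveFirst c s = pvDropBag [c] s := by
  induction s with
  | nil => rfl
  | cons x xs ih =>
    by_cases h : x = c <;> simp [pvRemoveFirst, pvDropBag, h, ih, pvDropBag_nil]

theorem pvDropBag_comp (s b1 b2 : List Char) :
    pvDropBag b1 (pvDropBag b2 s) = pvDropBag (b2 ++ b1) s := by
  induction s generalizing b1 b2 with
  | nil => simp [pvDropBag]
  | cons x xs ih =>
    by_cases h2 : x ∈ b2
    · have : (b2 ++ b1).erase x = b2.erase x ++ b1 := List.erase_append_left _ h2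
      simp [pvDropBag, h2, List.mem_append.mpr (Or.inl h2), this, ih]
    · by_cases h1 : x ∈ b1
      · have hm : x ∈ b2 ++ b1 := List.mem_append.mpr (Or.inr h1)
        have : (b2 ++ b1).erase x = b2 ++ b1.erase x := List.erase_append_right _ h2
        simp [pvDropBag, h2, h1, hm, this, ih]
      · have hm : x ∉ b2 ++ b1 := by simp [h2, h1]
        simp [pvDropBag, h2, h1, hm, ih]

theorem pvFoldl_removeFirst (w : List Char) (s : List Char) :
    w.foldl (fun t c => pvRemoveFirst c t) s = pvDropBag w s := by
  induction w generalizing s with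
  | nil => simp [List.foldl, pvDropBag_nil]
  | cons c w ih =>
    calc (c :: w).foldl (fun t c => pvRemoveFirst c t) s
        = w.foldl (fun t c => pvRemoveFirst c t) (pvRemoveFirst c s) := rfl
      _ = pvDropBag w (pvDropBag [c] s) := by rw [ih, pvRemoveFirst_eq]
      _ = pvDropBag ([c] ++ w) s := pvDropBag_comp ..
      _ = pvDropBag (c :: w) s := rfl

theorem pvCount_dropBag (s : List Char) (bag : List Char) (c : Char) :
    (pvDropBag bag s).count c = s.count c - min (bag.count c) (s.count c) := by
  induction s generalizing bag with
  | nil => simp [pvDropBag]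
  | cons x xs ih =>
    by_cases hx : x ∈ bag
    · by_cases hc : c = x
      · subst hc
        have h1 : 0 < bag.count c := List.count_pos_iff.mpr hx
        simp only [pvDropBag, if_pos hx, ih, List.count_erase_self, List.count_cons_self]
        omega
      · have : List.count c (bag.erase x) = List.count c bag := List.count_erase_of_ne hc
        simp only [pvDropBag, if_pos hx, ih, this]
        have hxc : ¬ x = c := fun hh => hc hh.symm
        simp [hxc]
    · have h0 : bag.count x = 0 := List.count_eq_zero.mpr hx
      by_cases hc : c = x
      · subst hc
        simp only [pvDropBag, if_neg hx, List.count_cons_self, ih, h0]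
        omega
      · simp only [pvDropBag, if_neg hx]
        have hxc : ¬ x = c := fun hh => hc hh.symm
        simp [hxc, ih]

/-- `n` copies of the word `w`, as one bag. -/
def pvBagRep (w : List Char) : Nat → List Char
  | 0 => []
  | n + 1 => w ++ pvBagRep w n

theorem pvCount_bagRep (w : List Char) (n : Nat) (c : Char) :
    (pvBagRep w n).count c = n * w.count c := by
  induction n with
  | zero => simp [pvBagRep]
  | succ n ih => simp [pvBagRep, List.count_append, ih]; ring

theorem pvInfix_singleton (c : Char) (s : List Char) : [c] <:+: s ↔ c ∈ s := by
  constructor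
  · intro h; exact List.singleton_sublist.mp h.sublist
  · intro h
    obtain ⟨l1, l2, rfl⟩ := List.append_of_mem h
    exact ⟨l1, l2, by simp⟩

theorem pvCountGo_singleton (c : Char) (s : List Char) :
    ∀ (fuel acc : Nat), s.length ≤ fuel →
      PySem.Chars.count.go [c] fuel s acc = acc + s.count c := by
  induction s with
  | nil => intro fuel acc _; cases fuel <;> simp [PySem.Chars.count.go.eq_def]
  | cons x xs ih =>
    intro fuel acc hf
    cases fuel with
    | zero => simp at hf
    | succ fuel =>
      rw [PySem.Chars.count.go.eq_def]
      by_cases h : x = c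
      · subst h
        have hp : [x].isPrefixOf (x :: xs) = true := by simp [List.isPrefixOf]
        simp only [hp, if_pos]
        have hd : List.drop ([x].length) (x :: xs) = xs := by simp
        rw [hd, ih fuel (acc + 1) (by simpa using hf)]
        simp [List.count_cons_self]; omega
      · have hp : [c].isPrefixOf (x :: xs) = false := by
          simp [List.isPrefixOf]
          intro hh; exact absurd hh.symm h
        simp only [hp]
        rw [if_neg (by simp)]
        rw [ih fuel acc (by simpa using Nat.le_of_succ_le_succ hf)]
        simp [h]

theorem pvCount_singleton (c : Char) (s : List Char) :
    PySem.Chars.count s [c] = s.count c := by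
  rw [PySem.Chars.count]
  simp only [List.isEmpty_cons, if_neg Bool.false_ne_true]
  simpa using pvCountGo_singleton c s s.length 0 (le_refl _)

theorem pvCountGo_not_infix (sub : List Char) :
    ∀ (fuel : Nat) (l : List Char) (acc : Nat), ¬ sub <:+: l →
      PySem.Chars.count.go sub fuel l acc = acc := by
  intro fuel
  induction fuel with
  | zero => intro l acc _; simp [PySem.Chars.count.go.eq_def]
  | succ fuel ih =>
    intro l acc h
    cases l with
    | nil => simp [PySem.Chars.count.go.eq_def]
    | cons x t =>
      rw [PySem.Chars.count.go.eq_def]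
      have hp : sub.isPrefixOf (x :: t) = false := by
        by_contra hb
        have hpre : sub <+: x :: t := List.isPrefixOf_iff_prefix.mp (by simpa using hb)
        exact h hpre.isInfix
      simp only [hp]
      rw [if_neg (by simp)]
      exact ih t acc (fun hi => h (hi.trans (List.suffix_cons x t).isInfix))

theorem pvCount_eq_zero_of_not_infix (s sub : List Char) (h : ¬ sub <:+: s) :
    PySem.Chars.count s sub = 0 := by
  have hne : sub ≠ [] := by rintro rfl; exact h List.nil_infix
  rw [PySem.Chars.count]
  rw [if_neg (by simp [hne])]
  exact pvCountGo_not_infix sub s.length s 0 h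

theorem pvBudget_getD (w : List Char) (k : Int) (d : PySem.Dict Char Int) (v : Char) :
    (w.foldl (fun d c => d.insert c (d.getD c 0 + k)) d).getD v 0
      = d.getD v 0 + k * w.count v := by
  induction w generalizing d with
  | nil => simp
  | cons c w ih =>
    rw [List.foldl_cons, ih]
    rw [PySem.Dict.getD_insert]
    by_cases h : v = c
    · subst h; simp [List.count_cons_self]; ring
    · simp [h, List.count_cons_of_ne (fun hh => h hh.symm)]

theorem pvScan_snd (s : List Char) (d : PySem.Dict Char Int) (bag : List Char)
    (acc : List Char) (hrel : ∀ c, d.getD c 0 = (bag.count c : Int)) :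
    (s.foldl
      (fun (st : PySem.Dict Char Int × List Char) ch =>
        if st.1.getD ch 0 > 0 then (st.1.insert ch (st.1.getD ch 0 - 1), st.2)
        else (st.1, st.2 ++ [ch]))
      (d, acc)).2 = acc ++ pvDropBag bag s := by
  induction s generalizing d bag acc with
  | nil => simp [pvDropBag]
  | cons x xs ih =>
    by_cases hx : x ∈ bag
    · have hpos : 0 < bag.count x := List.count_pos_iff.mpr hx
      have hgt : d.getD x 0 > 0 := by rw [hrel x]; exact_mod_cast hpos
      rw [List.foldl_cons, if_pos hgt]
      rw [ih (d.insert x (d.getD x 0 - 1)) (bag.erase x) acc ?_]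
      · simp [pvDropBag, hx]
      · intro c
        rw [PySem.Dict.getD_insert]
        by_cases hc : c = x
        · subst hc
          rw [if_pos rfl, hrel c, List.count_erase_self]
          omega
        · rw [if_neg hc, hrel c, List.count_erase_of_ne hc]
    · have h0 : bag.count x = 0 := List.count_eq_zero.mpr hx
      have hng : ¬ d.getD x 0 > 0 := by rw [hrel x, h0]; omega
      rw [List.foldl_cons, if_neg hng]
      rw [ih d bag (acc ++ [x]) hrel]
      simp [pvDropBag, hx]

theorem pvLoop_run (L : Char) (digit : String) (w : List Char) (t : Nat)
    (hw : w.count L = t) (ht : 0 < t) :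
    ∀ (r fuel : Nat) (s : List Char) (nums : List String),
      (s.count L + t - 1) / t = r → r < fuel →
      pullOutLoop [L] digit w fuel s nums
        = (pvDropBag (pvBagRep w r) s, nums ++ List.replicate r digit) := by
  intro r
  induction r with
  | zero =>
    intro fuel s nums hc hf
    cases fuel with
    | zero => omega
    | succ fuel =>
      have hm : s.count L = 0 := by
        by_contra hmn
        have h1 : s.count L + t - 1 = (s.count L - 1) + t := by omega
        rw [h1, Nat.add_div_right _ ht] at hc
        exact Nat.succ_ne_zero _ hc
      have hnot : ¬ L ∈ s := fun hmem => by
        have := List.count_pos_iff.mpr hmem; omega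
      have hfind : PySem.Chars.find s [L] = -1 :=
        (PySem.Chars.find_eq_neg_one_iff s [L]).mpr
          (fun hi => hnot ((pvInfix_singleton L s).mp hi))
      simp [pullOutLoop, hfind, pvBagRep, pvDropBag_nil]
  | succ r ih =>
    intro fuel s nums hc hf
    cases fuel with
    | zero => omega
    | succ fuel =>
      have hm : s.count L ≠ 0 := by
        intro h0
        rw [h0, Nat.div_eq_of_lt (by omega)] at hc
        omega
      have hr : (s.count L - 1) / t = r := by
        have h1 : s.count L + t - 1 = (s.count L - 1) + t := by omega
        rw [h1, Nat.add_div_right _ ht] at hc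
        exact Nat.add_right_cancel hc
      have hmem : L ∈ s := List.count_pos_iff.mp (by omega)
      have hfind : PySem.Chars.find s [L] ≠ -1 :=
        (PySem.Chars.find_ne_neg_one_iff s [L]).mpr ((pvInfix_singleton L s).mpr hmem)
      rw [pullOutLoop, if_pos hfind]
      rw [pvFoldl_removeFirst w s]
      have hcount : (pvDropBag w s).count L = s.count L - min t (s.count L) := by
        rw [pvCount_dropBag, hw]
      have hc' : ((pvDropBag w s).count L + t - 1) / t = r := by
        rw [hcount]
        by_cases hmt : t ≤ s.count L
        · have harg : (s.count L - min t (s.count L)) + t - 1 = s.count L - 1 := by omega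
          rw [harg]; exact hr
        · have harg : (s.count L - min t (s.count L)) + t - 1 = t - 1 := by omega
          have h0 : (s.count L - 1) / t = 0 := Nat.div_eq_of_lt (by omega)
          rw [harg, Nat.div_eq_of_lt (by omega), ← hr, h0]
      rw [ih fuel (pvDropBag w s) (nums ++ [digit]) hc' (by omega)]
      rw [pvDropBag_comp]
      simp [pvBagRep, List.replicate_succ]

-- ===== VERDICT (by name: the statement is the Claim_ definition above) =====
theorem pullOut_spec : Claim_equal_pullOut := by
  intro letter digit digitWord scramble _ hpre
  unfold Spec_pullOut pullOut pullOut_alt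
  rcases hpre with hfind | ⟨hlen, hcnt⟩
  · -- letter does not occur in scramble: the loop body never runs; B's count is 0
    rw [PySem.Str.find_eq] at hfind
    have hni : ¬ letter.toList <:+: scramble.toList :=
      (PySem.Chars.find_eq_neg_one_iff _ _).mp hfind
    have hk : PySem.Str.count scramble letter = 0 := by
      rw [PySem.Str.count_eq]; exact pvCount_eq_zero_of_not_infix _ _ hni
    have hA : pullOutLoop letter.toList digit digitWord.toList
        (scramble.toList.length + 1) scramble.toList [] = (scramble.toList, []) := by
      simp [pullOutLoop, hfind]
    simp only [hA, hk]
    simp [String.ofList_toList]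
  · -- letter is one character, removed at least once per loop pass
    obtain ⟨L, hL⟩ := List.length_eq_one_iff.mp hlen
    have htw : PySem.Str.count digitWord letter = digitWord.toList.count L := by
      rw [PySem.Str.count_eq, hL, pvCount_singleton]
    have ht : 0 < digitWord.toList.count L := by omega
    have hk : PySem.Str.count scramble letter = scramble.toList.count L := by
      rw [PySem.Str.count_eq, hL, pvCount_singleton]
    by_cases hm0 : scramble.toList.count L = 0
    · -- letter absent after all: A's loop exits at once, B takes the early return
      have hA := pvLoop_run L digit digitWord.toList (digitWord.toList.count L) rfl ht
        0 (scramble.toList.length + 1) scramble.toList []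
        (by rw [hm0, Nat.div_eq_of_lt (by omega)]) (by omega)
      simp only [hL, hk, hm0, hA]
      simp [pvBagRep, pvDropBag_nil, String.ofList_toList]
    · have hrm : (scramble.toList.count L + digitWord.toList.count L - 1) / digitWord.toList.count L
          ≤ scramble.toList.count L := by
        have h1 : scramble.toList.count L + digitWord.toList.count L - 1
            = (scramble.toList.count L - 1) + digitWord.toList.count L := by omega
        rw [h1, Nat.add_div_right _ ht]
        have h2 : (scramble.toList.count L - 1) / digitWord.toList.count L
            < scramble.toList.count L :=
          Nat.lt_of_le_of_lt (Nat.div_le_self _ _) (by omega)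
        exact Nat.succ_le_of_lt h2
      have hA := pvLoop_run L digit digitWord.toList (digitWord.toList.count L) rfl ht
        ((scramble.toList.count L + digitWord.toList.count L - 1) / digitWord.toList.count L)
        (scramble.toList.length + 1) scramble.toList [] rfl
        (by have := List.count_le_length (a := L) (l := scramble.toList); omega)
      have hrel : ∀ c, (digitWord.toList.foldl
          (fun d c => d.insert c (d.getD c 0 +
            (((scramble.toList.count L + digitWord.toList.count L - 1) / digitWord.toList.count L
              : Nat) : Int)))
            PySem.Dict.empty).getD c 0
          = ((pvBagRep digitWord.toList
              ((scramble.toList.count L + digitWord.toList.count L - 1) / digitWord.toList.count L)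
             ).count c : Int) := by
        intro c; rw [pvBudget_getD, pvCount_bagRep, PySem.Dict.getD_empty]; push_cast; ring
      simp only [hL, hk, htw, hA]
      rw [if_neg hm0]
      rw [pvScan_snd scramble.toList _ (pvBagRep digitWord.toList
        ((scramble.toList.count L + digitWord.toList.count L - 1) / digitWord.toList.count L)) [] hrel]
      simp
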